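-- pv_equiv track=rewrite | github.com/dstoltz/misp-modules | misp_modules/modules/import_mod/csvimport.py | findDelimiter
-- ===== SOURCE A (Python) =====
-- def findDelimiter(header, data):
--     n = len(header)
--     if n > 1:
--         tmpData = []
--         for da in data:
--             tmp = []
--             for d in (';', '|', '/', ',', '\t', '    ',):
--                 if da.count(d) == (n-1):
--                     tmp.append(d)
--             if len(tmp) == 1 and tmp == tmpData:
--                 return tmpData[0], n
--             else:
--                 tmpData = tmp
--     else:
--         return None, 1
-- ===== SOURCE B (Python) =====
-- DELIMS = (';', '|', '/', ',', '\t', '    ')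
--
-- def findDelimiter(header, data):
--     n = len(header)
--     if n <= 1:
--         return None, 1
--     # delimiter-major pass: per-row number of matching delimiters, and first matching delimiter
--     counts = [0] * len(data)
--     first = [None] * len(data)
--     for d in DELIMS:
--         flags = [row.count(d) == n - 1 for row in data]
--         counts = [c + f for c, f in zip(counts, flags)]
--         first = [l if l is not None else (d if f else None) for l, f in zip(first, flags)]
--     # a row determines the delimiter iff exactly one delimiter matches; answer = first
--     # adjacent pair of rows that determine the same delimiter
--     pairs = list(zip(counts, first))
--     for (c0, l0), (c1, l1) in zip(pairs, pairs[1:]):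
--         if c1 == 1 and c0 == 1 and l1 == l0:
--             return l1, n
-- ===== Notes on version B (the rewrite author's own statement) =====
-- stated objective: alternative
-- what changed: B transposes the computation: an outer loop over the six delimiters builds per-row match-count and first-match columns (no per-row candidate lists and no list-accumulator comparison), then one scan over adjacent (count, first) pairs finds the answer.
-- outside the precondition, e.g. on findDelimiter(['a', 'b'], []): A returns None, B returns None; on findDelimiter(['a', 'b'], ['1;2']): A returns None, B returns None
import Mathlib
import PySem

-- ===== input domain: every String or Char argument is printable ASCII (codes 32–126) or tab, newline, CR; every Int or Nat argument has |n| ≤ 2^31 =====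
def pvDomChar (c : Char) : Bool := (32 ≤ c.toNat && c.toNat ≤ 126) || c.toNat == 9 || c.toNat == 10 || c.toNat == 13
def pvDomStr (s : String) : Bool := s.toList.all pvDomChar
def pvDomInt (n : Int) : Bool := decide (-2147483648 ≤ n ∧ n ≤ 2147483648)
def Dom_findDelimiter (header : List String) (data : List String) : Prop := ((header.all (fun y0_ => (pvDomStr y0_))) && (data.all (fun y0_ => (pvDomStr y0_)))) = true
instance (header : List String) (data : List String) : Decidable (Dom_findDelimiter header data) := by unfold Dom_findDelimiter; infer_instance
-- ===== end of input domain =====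

-- B transposes the work: a delimiter-major pass builds per-row match-count and first-match
-- columns, then a single adjacent-pair scan; same return value wherever A returns a pair.

-- the delimiter tuple (';', '|', '/', ',', '\t', '    ')
def pvDelims : List String := [";", "|", "/", ",", "\t", "    "]

-- ===== PORT A =====
-- loop 'for da in data' carrying tmpData; after the loop Python falls off returning bare None,
-- which is outside Pre_ (see below); the port returns (none, n) there (unclaimed).
def findDelimAuxA (n : Int) (tmpData : List String) : List String → Option String × Int
  | [] => (none, n)
  | da :: rest =>
    let tmp := pvDelims.foldl (fun acc d => if (PySem.Str.count da d : Int) = n - 1 then acc ++ [d] else acc) []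
    if tmp.length = 1 ∧ tmp = tmpData then
      -- tmpData[0]: index 0 exists here since tmp = tmpData and len(tmp) == 1
      (((PySem.List.pyGet? tmpData 0).getD "" : String), n)
    else findDelimAuxA n tmp rest

def findDelimiter (header : List String) (data : List String) : Option String × Int :=
  let n : Int := header.length
  if n > 1 then findDelimAuxA n [] data else (none, 1)

-- ===== PORT B =====
-- scan over zip(pairs, pairs[1:]) : first adjacent pair (c0,l0),(c1,l1) with c1==1==c0 and l1==l0
def scanPairsB (n : Int) : List (Int × Option String) → Option String × Int
  | (c0, l0) :: (c1, l1) :: rest =>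
    if c1 = 1 ∧ c0 = 1 ∧ l1 = l0 then (l1, n) else scanPairsB n ((c1, l1) :: rest)
  | _ => (none, n)   -- Python's implicit bare None; outside Pre_ (unclaimed)

def findDelimiter_alt (header : List String) (data : List String) : Option String × Int :=
  let n : Int := header.length
  if n ≤ 1 then (none, 1)
  else
    let cl := pvDelims.foldl
      (fun (cl : List Int × List (Option String)) d =>
        let flags := data.map (fun row => decide ((PySem.Str.count row d : Int) = n - 1))
        (List.zipWith (fun c f => if f then c + 1 else c) cl.1 flags,
         List.zipWith (fun l f => if l.isSome then l else if f then some d else none) cl.2 flags))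
      (List.replicate data.length (0 : Int), List.replicate data.length (none : Option String))
    scanPairsB n (cl.1.zip cl.2)

-- ===== PRECONDITION & SPEC =====
-- proof-side description of a row's matching delimiters (used only by Pre_ and the lemmas)
def rowMatchesF (n : Int) (da : String) : List String :=
  pvDelims.filter (fun d => (PySem.Str.count da d : Int) = n - 1)

-- Pre_ excludes exactly the inputs where A falls off its loop and returns bare None — not a
-- (str|None, int) pair of the declared type — i.e. n > 1 with no adjacent pair of rows whose
-- matching-delimiter lists are equal and of length 1; B returns bare None there too.
def Pre_findDelimiter (header : List String) (data : List String) : Prop :=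
  (header.length : Int) ≤ 1 ∨
    (∃ p ∈ (data.map (rowMatchesF header.length)).zip (data.map (rowMatchesF header.length)).tail,
      p.2 = p.1 ∧ p.2.length = 1)
instance (header : List String) (data : List String) : Decidable (Pre_findDelimiter header data) := by
  unfold Pre_findDelimiter; infer_instance

def pvWitness_findDelimiter : List String × List String := (["a", "b"], ["1;2", "3;4"])

def Spec_findDelimiter (header : List String) (data : List String) (out : Option String × Int) : Prop := out = findDelimiter_alt header data
instance (header : List String) (data : List String) (out : Option String × Int) : Decidable (Spec_findDelimiter header data out) := by unfold Spec_findDelimiter; infer_instance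

-- ===== CLAIM (what is proved, stated in full; the proofs are below) =====
def Claim_equal_findDelimiter : Prop := ∀ (header : List String) (data : List String), Dom_findDelimiter header data → Pre_findDelimiter header data → Spec_findDelimiter header data (findDelimiter header data)

-- ===== LEMMAS AND PROOFS =====

-- proof-only view of a row: (number of matching delimiters, first matching delimiter)
def pairOf (l : List String) : Int × Option String := ((l.length : Int), l.head?)

-- zipWith of two maps over the same list
theorem zipWith_map_same {α β γ δ : Type} (f : β → γ → δ) (g : α → β) (h : α → γ) (l : List α) :
    List.zipWith f (l.map g) (l.map h) = l.map (fun x => f (g x) (h x)) := by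
  induction l with
  | nil => rfl
  | cons x xs ih => simp [ih]

-- per-row count fold = filter length
theorem foldl_cnt (p : String → Bool) (ds : List String) : ∀ (a : Int),
    ds.foldl (fun c d => if p d then c + 1 else c) a = a + ((ds.filter p).length : Int) := by
  induction ds with
  | nil => intro a; simp
  | cons d ds ih =>
    intro a
    rw [List.foldl_cons, ih]
    by_cases h : p d = true
    · simp [h]
      ring
    · simp [h]

-- per-row first-match fold = acc.or (find?)
theorem foldl_first (p : String → Bool) (ds : List String) : ∀ (a : Option String),
    ds.foldl (fun l d => if l.isSome then l else if p d then some d else none) a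
      = a.or (ds.find? p) := by
  induction ds with
  | nil => intro a; simp
  | cons d ds ih =>
    intro a
    cases a with
    | some x => simp [List.foldl, ih]
    | none =>
      rw [List.foldl_cons]
      by_cases h : p d = true
      · simp [h, ih]
      · simp [h, ih]

-- the delimiter-major fold computes both columns pointwise
theorem fold_cols (P : String → String → Bool) (data : List String) (ds : List String) :
    ∀ (c0 : String → Int) (g0 : String → Option String),
    ds.foldl
      (fun (cl : List Int × List (Option String)) d =>
        let flags := data.map (fun row => P row d)
        (List.zipWith (fun c f => if f then c + 1 else c) cl.1 flags,
         List.zipWith (fun l f => if l.isSome then l else if f then some d else none) cl.2 flags))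
      (data.map c0, data.map g0)
    = (data.map (fun row => ds.foldl (fun c d => if P row d then c + 1 else c) (c0 row)),
       data.map (fun row => ds.foldl (fun l d => if l.isSome then l else if P row d then some d else none) (g0 row))) := by
  induction ds with
  | nil => intro c0 g0; rfl
  | cons d ds ih =>
    intro c0 g0
    simp only [List.foldl, zipWith_map_same]
    exact ih (fun row => if P row d then c0 row + 1 else c0 row)
             (fun row => if (g0 row).isSome then g0 row else if P row d then some d else none)

-- A's inner append-loop computes the filter
theorem tmp_eq_rowMatchesF (n : Int) (da : String) :
    pvDelims.foldl (fun acc d => if (PySem.Str.count da d : Int) = n - 1 then acc ++ [d] else acc) []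
      = rowMatchesF n da := by
  simpa [rowMatchesF] using
    PySem.List.foldl_append_ite_eq_filter
      (l := pvDelims) (p := fun d => (PySem.Str.count da d : Int) = n - 1) (acc := [])

-- A's row loop with accumulator tmpData equals the pair scan over pairOf tmpData :: mapped rows
theorem auxA_eq_scanB (n : Int) (data : List String) : ∀ (tmpData : List String),
    findDelimAuxA n tmpData data
      = scanPairsB n (pairOf tmpData :: data.map (fun row => pairOf (rowMatchesF n row))) := by
  induction data with
  | nil => intro tmpData; simp [findDelimAuxA, scanPairsB]
  | cons da rest ih =>
    intro tmpData
    rw [findDelimAuxA, tmp_eq_rowMatchesF]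
    simp only [List.map, pairOf, scanPairsB]
    by_cases hA : (rowMatchesF n da).length = 1 ∧ rowMatchesF n da = tmpData
    · obtain ⟨h1, h2⟩ := hA
      match hm : rowMatchesF n da, h1, h2 with
      | [d], _, h2 =>
        simp [← h2, PySem.List.pyGet?, PySem.List.pyIdx?]
    · have hB : ¬ (((rowMatchesF n da).length : Int) = 1 ∧ (tmpData.length : Int) = 1 ∧
          (rowMatchesF n da).head? = tmpData.head?) := by
        rintro ⟨hc1, hc0, hl⟩
        apply hA
        have hl1 : (rowMatchesF n da).length = 1 := by exact_mod_cast hc1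
        have hl0 : tmpData.length = 1 := by exact_mod_cast hc0
        obtain ⟨x, hx⟩ := List.length_eq_one_iff.mp hl1
        obtain ⟨y, hy⟩ := List.length_eq_one_iff.mp hl0
        rw [hx, hy] at hl
        simp only [List.head?] at hl
        injection hl with hxy
        exact ⟨hl1, by rw [hx, hy, hxy]⟩
      rw [if_neg hA, if_neg hB]
      simpa only [pairOf] using ih (rowMatchesF n da)

-- the leading (0, none) pair never fires
theorem scanB_cons_zero (n : Int) (l : List (Int × Option String)) :
    scanPairsB n (((0 : Int), (none : Option String)) :: l) = scanPairsB n l := by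
  cases l with
  | nil => rfl
  | cons p rest =>
    obtain ⟨c1, l1⟩ := p
    rw [scanPairsB]
    rw [if_neg (by rintro ⟨-, h, -⟩; exact absurd h (by decide))]

-- ===== VERDICT (by name: the statement is the Claim_ definition above) =====
theorem findDelimiter_spec : Claim_equal_findDelimiter := by
  intro header data _ _
  unfold Spec_findDelimiter findDelimiter findDelimiter_alt
  by_cases h : (header.length : Int) > 1
  · have h' : ¬ (header.length : Int) ≤ 1 := by omega
    simp only [if_pos h, if_neg h']
    rw [auxA_eq_scanB]
    have hrepl1 : List.replicate data.length (0 : Int) = data.map (fun _ => (0 : Int)) := by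
      simp
    have hrepl2 : List.replicate data.length (none : Option String)
        = data.map (fun _ => (none : Option String)) := by simp
    rw [hrepl1, hrepl2,
        fold_cols (fun row d => decide ((PySem.Str.count row d : Int) = (header.length : Int) - 1))
          data pvDelims (fun _ => 0) (fun _ => none)]
    simp only [List.zip_map']
    have hpt : ∀ row : String,
        ((pvDelims.foldl (fun c d => if decide ((PySem.Str.count row d : Int) = (header.length : Int) - 1) then c + 1 else c) (0 : Int)),
         (pvDelims.foldl (fun l d => if l.isSome then l else if decide ((PySem.Str.count row d : Int) = (header.length : Int) - 1) then some d else none) (none : Option String)))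
        = pairOf (rowMatchesF header.length row) := by
      intro row
      rw [foldl_cnt, foldl_first, ← List.head?_filter]
      simp [pairOf, rowMatchesF]
    simp only [hpt]
    rw [show pairOf ([] : List String) = ((0 : Int), (none : Option String)) from rfl]
    exact scanB_cons_zero _ _
  · have h1 : ¬ 1 < header.length := by omega
    have h2 : (header.length : Int) ≤ 1 := by omega
    simp [h1, h2]
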